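-- pv_equiv track=rewrite | github.com/TilenG2/Programiranje1 | Domace_Naloge/DN5_test.py | globina
-- ===== SOURCE A (Python) =====
-- ovire1 = [(1, 3, 6), (2, 4, 3), (4, 6, 7),
--           (3, 4, 9), (6, 9, 5), (9, 10, 2), (9, 10, 8)]
--
-- def globina(ovire, x):
--     height = 0
--     for _, _, y in ovire1:
--         if height < y:
--             height = y
--
--     i = 1
--     test = False
--     while i < 10:
--         for x1, x2, y in ovire:
--             if i == y and x1 <= x <= x2:
--                 return i
--         if test: break
--         i += 1
--     return None
-- ===== SOURCE B (Python) =====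
-- def globina(ovire, x):
--     candidates = [y for x1, x2, y in ovire if x1 <= x <= x2 and y in range(1, 10)]
--     return min(candidates) if candidates else None
-- ===== Notes on version B (the rewrite author's own statement) =====
-- stated objective: simpler
-- what changed: Drops the dead initial max-height loop over the global ovire1 and replaces the level-by-level while loop (for each i in 1..9, rescan all obstacles) with a single pass collecting heights of covering obstacles in 1..9 and taking their minimum.
import Mathlib
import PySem

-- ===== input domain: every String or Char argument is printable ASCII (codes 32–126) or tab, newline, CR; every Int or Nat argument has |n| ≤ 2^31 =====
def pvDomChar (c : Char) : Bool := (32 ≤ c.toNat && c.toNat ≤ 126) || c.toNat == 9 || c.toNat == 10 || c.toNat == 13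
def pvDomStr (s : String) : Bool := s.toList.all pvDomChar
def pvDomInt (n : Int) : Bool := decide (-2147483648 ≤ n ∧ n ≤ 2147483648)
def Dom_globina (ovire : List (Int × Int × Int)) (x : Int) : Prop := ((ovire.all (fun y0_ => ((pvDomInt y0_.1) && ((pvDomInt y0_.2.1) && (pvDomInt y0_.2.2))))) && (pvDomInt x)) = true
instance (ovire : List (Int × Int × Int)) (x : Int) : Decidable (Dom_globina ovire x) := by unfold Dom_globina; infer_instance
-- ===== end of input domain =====

-- B drops A's dead initial loop and its level-by-level rescans: one pass collects covering heights in 1..9, the result is their minimum (simpler; return value only, no side effects involved).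

-- ===== PORT A =====
def ovire1 : List (Int × Int × Int) :=
  [(1, 3, 6), (2, 4, 3), (4, 6, 7), (3, 4, 9), (6, 9, 5), (9, 10, 2), (9, 10, 8)]

-- the inner 'for x1, x2, y in ovire' scan at level i (returns i on the first hit)
def globinaScan (ovire : List (Int × Int × Int)) (x i : Int) : Option Int :=
  match ovire with
  | [] => none
  | (x1, x2, y) :: rest =>
      if i = y ∧ x1 ≤ x ∧ x ≤ x2 then some i else globinaScan rest x i

-- the 'while i < 10' loop; fuel 9 covers all its iterations starting from i = 1
def globinaWhile (ovire : List (Int × Int × Int)) (x i : Int) (test : Bool) : Nat → Option Int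
  | 0 => none
  | Nat.succ f =>
      if i < 10 then
        match globinaScan ovire x i with
        | some r => some r
        | none => if test then none else globinaWhile ovire x (i + 1) test f
      else none

def globina (ovire : List (Int × Int × Int)) (x : Int) : Option Int :=
  let _height : Int := ovire1.foldl (fun h t => if h < t.2.2 then t.2.2 else h) 0
  globinaWhile ovire x 1 false 9

-- ===== PORT B =====
def globina_alt (ovire : List (Int × Int × Int)) (x : Int) : Option Int :=
  let candidates :=
    (ovire.filter (fun t => decide (t.1 ≤ x ∧ x ≤ t.2.1 ∧ 1 ≤ t.2.2 ∧ t.2.2 ≤ 9))).map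
      (fun t => t.2.2)
  if candidates.isEmpty then none else PySem.List.min? candidates (fun y => y)

-- ===== PRECONDITION & SPEC =====
def Spec_globina (ovire : List (Int × Int × Int)) (x : Int) (out : Option Int) : Prop := out = globina_alt ovire x
instance (ovire : List (Int × Int × Int)) (x : Int) (out : Option Int) : Decidable (Spec_globina ovire x out) := by unfold Spec_globina; infer_instance

-- ===== CLAIM (what is proved, stated in full; the proofs are below) =====
def Claim_equal_globina : Prop := ∀ (ovire : List (Int × Int × Int)) (x : Int), Dom_globina ovire x → Spec_globina ovire x (globina ovire x)

-- ===== LEMMAS AND PROOFS =====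

-- candidate list abbreviation for the proofs
def pvC (ovire : List (Int × Int × Int)) (x : Int) : List Int :=
  (ovire.filter (fun t => decide (t.1 ≤ x ∧ x ≤ t.2.1 ∧ 1 ≤ t.2.2 ∧ t.2.2 ≤ 9))).map
    (fun t => t.2.2)

lemma pvC_mem {ovire : List (Int × Int × Int)} {x y : Int} (h : y ∈ pvC ovire x) :
    1 ≤ y ∧ y ≤ 9 := by
  simp only [pvC, List.mem_map, List.mem_filter, decide_eq_true_eq] at h
  obtain ⟨t, ⟨_, _, _, h1, h9⟩, rfl⟩ := h
  exact ⟨h1, h9⟩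

lemma scan_of_mem {ovire : List (Int × Int × Int)} {x i : Int} (h : i ∈ pvC ovire x) :
    globinaScan ovire x i = some i := by
  induction ovire with
  | nil => simp [pvC] at h
  | cons t rest ih =>
    obtain ⟨x1, x2, y⟩ := t
    simp only [pvC, List.filter_cons] at h
    by_cases hc : i = y ∧ x1 ≤ x ∧ x ≤ x2
    · simp [globinaScan, hc]
    · rw [globinaScan]
      rw [if_neg hc]
      apply ih
      split at h
      · rename_i hp
        simp only [decide_eq_true_eq] at hp
        obtain ⟨ha, hb, h1, h9⟩ := hp
        simp only [List.map_cons, List.mem_cons] at h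
        rcases h with rfl | h
        · exact absurd ⟨rfl, ha, hb⟩ hc
        · exact h
      · exact h

lemma scan_of_not_mem {ovire : List (Int × Int × Int)} {x i : Int}
    (h1 : 1 ≤ i) (h9 : i ≤ 9) (h : i ∉ pvC ovire x) :
    globinaScan ovire x i = none := by
  induction ovire with
  | nil => rfl
  | cons t rest ih =>
    obtain ⟨x1, x2, y⟩ := t
    simp only [pvC, List.filter_cons] at h
    rw [globinaScan]
    rw [if_neg, ih]
    · intro hm
      apply h
      split
      · simp only [List.map_cons, List.mem_cons]; right; exact hm
      · exact hm
    · rintro ⟨rfl, ha, hb⟩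
      apply h
      have : decide (x1 ≤ x ∧ x ≤ x2 ∧ 1 ≤ i ∧ i ≤ 9) = true := by
        simp [ha, hb, h1, h9]
      rw [if_pos this]
      simp

lemma min?_eq_of_least {l : List Int} {i : Int} (hm : i ∈ l)
    (hle : ∀ y ∈ l, i ≤ y) : PySem.List.min? l (fun y => y) = some i := by
  have hne : l ≠ [] := by intro h; subst h; simp at hm
  cases hmin : PySem.List.min? l (fun y => y) with
  | none => exact absurd ((PySem.List.min?_eq_none_iff l (fun y => y)).mp hmin) hne
  | some m =>
    have h1 : m ∈ l := PySem.List.min?_mem hmin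
    have h2 : m ≤ i := PySem.List.min?_isMin hmin i hm
    have h3 : i ≤ m := hle m h1
    have : m = i := le_antisymm h2 h3
    rw [this]

lemma while_eq_min {ovire : List (Int × Int × Int)} {x : Int} :
    ∀ (f : Nat) (i : Int), 1 ≤ i → 10 ≤ i + f →
      (∀ y ∈ pvC ovire x, i ≤ y) →
      globinaWhile ovire x i false f = PySem.List.min? (pvC ovire x) (fun y => y) := by
  intro f
  induction f with
  | zero =>
    intro i _ hf hinv
    have hemp : pvC ovire x = [] := by
      cases hC : pvC ovire x with
      | nil => rfl
      | cons a t =>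
        have ha : a ∈ pvC ovire x := by rw [hC]; simp
        have := (pvC_mem ha).2
        have := hinv a ha
        omega
    rw [hemp]
    rfl
  | succ f ih =>
    intro i h1 hf hinv
    rw [globinaWhile]
    by_cases hi : i < 10
    · rw [if_pos hi]
      by_cases hmem : i ∈ pvC ovire x
      · rw [scan_of_mem hmem]
        exact (min?_eq_of_least hmem hinv).symm
      · rw [scan_of_not_mem h1 (by omega) hmem]
        simp only [Bool.false_eq_true, if_false]
        apply ih (i + 1) (by omega) (by omega)
        intro y hy
        have := hinv y hy
        rcases lt_or_eq_of_le this with h | h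
        · omega
        · exact absurd (h ▸ hy) hmem
    · rw [if_neg hi]
      have hemp : pvC ovire x = [] := by
        cases hC : pvC ovire x with
        | nil => rfl
        | cons a t =>
          have ha : a ∈ pvC ovire x := by rw [hC]; simp
          have := (pvC_mem ha).2
          have := hinv a ha
          omega
      rw [hemp]
      rfl

-- ===== VERDICT (by name: the statement is the Claim_ definition above) =====
theorem globina_spec : Claim_equal_globina := by
  intro ovire x _
  show globina ovire x = globina_alt ovire x
  unfold globina globina_alt
  have h := while_eq_min (ovire := ovire) (x := x) 9 1 (by omega) (by omega)
    (fun y hy => (pvC_mem hy).1)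
  simp only []
  rw [h]
  by_cases hC : pvC ovire x = []
  · rw [show ((ovire.filter (fun t => decide (t.1 ≤ x ∧ x ≤ t.2.1 ∧ 1 ≤ t.2.2 ∧ t.2.2 ≤ 9))).map (fun t => t.2.2)) = pvC ovire x from rfl, hC]
    rfl
  · rw [show ((ovire.filter (fun t => decide (t.1 ≤ x ∧ x ≤ t.2.1 ∧ 1 ≤ t.2.2 ∧ t.2.2 ≤ 9))).map (fun t => t.2.2)) = pvC ovire x from rfl]
    rw [if_neg (by simpa [List.isEmpty_iff] using hC)]
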